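-- pv_equiv track=rewrite | github.com/WariRay/Noonan-extraction-patterns | extraction-patterns.py | process_concept_validation
-- ===== SOURCE A (Python) =====
-- def process_concept_validation(concept_validation_tuples):
--     new_pairs_tuple = []
--     phenotypes = []
--     valid_concepts = []
--     for phenotype, concept, bool in concept_validation_tuples:
--         if bool == "TRUE":
--             new_pairs_tuple.append((phenotype, concept))
--             phenotypes.append(phenotype)
--             valid_concepts.append(concept)
--     return new_pairs_tuple, phenotypes, valid_concepts
-- ===== SOURCE B (Python) =====
-- def process_concept_validation(concept_validation_tuples):
--     # Count-then-fill: first pass counts the valid rows, then three fixed-size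
--     # lists are preallocated and filled through a write cursor (no appends).
--     n = 0
--     for _, _, flag in concept_validation_tuples:
--         if flag == "TRUE":
--             n += 1
--     new_pairs_tuple = [None] * n
--     phenotypes = [None] * n
--     valid_concepts = [None] * n
--     i = 0
--     for phenotype, concept, flag in concept_validation_tuples:
--         if flag == "TRUE":
--             new_pairs_tuple[i] = (phenotype, concept)
--             phenotypes[i] = phenotype
--             valid_concepts[i] = concept
--             i += 1
--     return new_pairs_tuple, phenotypes, valid_concepts
-- ===== Notes on version B (the rewrite author's own statement) =====
-- stated objective: alternative
-- what changed: Replaces the single append-driven loop with a count-then-fill scheme: a first pass counts the valid rows, three fixed-size lists are preallocated, and a second pass writes each valid row into the next slot through an explicit write cursor.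
import Mathlib
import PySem

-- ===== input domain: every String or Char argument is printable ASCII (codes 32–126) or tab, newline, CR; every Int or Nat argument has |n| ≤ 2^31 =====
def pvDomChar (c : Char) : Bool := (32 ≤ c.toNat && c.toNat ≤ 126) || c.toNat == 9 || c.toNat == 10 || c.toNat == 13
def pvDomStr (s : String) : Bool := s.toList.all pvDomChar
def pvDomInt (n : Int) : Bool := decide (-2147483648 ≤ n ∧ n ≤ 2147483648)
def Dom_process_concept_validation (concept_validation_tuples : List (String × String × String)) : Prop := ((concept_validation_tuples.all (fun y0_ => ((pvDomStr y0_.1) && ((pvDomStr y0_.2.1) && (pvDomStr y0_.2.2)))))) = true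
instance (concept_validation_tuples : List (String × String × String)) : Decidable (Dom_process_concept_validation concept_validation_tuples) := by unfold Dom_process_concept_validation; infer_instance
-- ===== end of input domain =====

-- B changes the construction scheme (count, preallocate, fill by cursor) rather than
-- appending to three growing lists; same O(n) cost, proved to return the same triple.

-- ===== PORT A =====
-- Port of A: one fold over the tuples carrying the three accumulator lists,
-- appending to each when the flag equals "TRUE" (literal transliteration of A's loop).
def process_concept_validation (concept_validation_tuples : List (String × String × String)) : (List (String × String)) × List String × List String :=
  let st := concept_validation_tuples.foldl
    (fun (acc : (List (String × String)) × List String × List String) t =>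
      let (phenotype, concept, b) := t
      if b == "TRUE" then
        (acc.1 ++ [(phenotype, concept)], acc.2.1 ++ [phenotype], acc.2.2 ++ [concept])
      else acc)
    ([], [], [])
  st

-- ===== PORT B =====
-- Port of B: count-then-fill. Python preallocates three [None]*n lists and overwrites
-- slots through a write cursor i; the Option lists with List.set render exactly that,
-- and the final `.map (·.getD …)` renders reading out the fully overwritten lists
-- (exact: after the fill every slot up to the cursor is `some`, and n slots are filled).
def pcvFillStep (st : List (Option (String × String)) × List (Option String) × List (Option String) × Nat)
    (t : String × String × String) :
    List (Option (String × String)) × List (Option String) × List (Option String) × Nat :=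
  let (phenotype, concept, flag) := t
  if flag == "TRUE" then
    (st.1.set st.2.2.2 (some (phenotype, concept)),
     st.2.1.set st.2.2.2 (some phenotype),
     st.2.2.1.set st.2.2.2 (some concept),
     st.2.2.2 + 1)
  else st

def process_concept_validation_alt (concept_validation_tuples : List (String × String × String)) : (List (String × String)) × List String × List String :=
  let n := concept_validation_tuples.foldl (fun n t => if t.2.2 == "TRUE" then n + 1 else n) 0
  let st := concept_validation_tuples.foldl pcvFillStep
    (List.replicate n none, List.replicate n none, List.replicate n none, 0)
  (st.1.map (fun o => o.getD ("", "")),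
   st.2.1.map (fun o => o.getD ""),
   st.2.2.1.map (fun o => o.getD ""))

-- ===== PRECONDITION & SPEC =====
def Spec_process_concept_validation (concept_validation_tuples : List (String × String × String)) (out : (List (String × String)) × List String × List String) : Prop := out = process_concept_validation_alt concept_validation_tuples
instance (concept_validation_tuples : List (String × String × String)) (out : (List (String × String)) × List String × List String) : Decidable (Spec_process_concept_validation concept_validation_tuples out) := by unfold Spec_process_concept_validation; infer_instance

-- ===== CLAIM (what is proved, stated in full; the proofs are below) =====
def Claim_equal_process_concept_validation : Prop := ∀ (concept_validation_tuples : List (String × String × String)), Dom_process_concept_validation concept_validation_tuples → Spec_process_concept_validation concept_validation_tuples (process_concept_validation concept_validation_tuples)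

-- ===== LEMMAS AND PROOFS =====

def pcvPred (t : String × String × String) : Bool := t.2.2 == "TRUE"

-- A's fold, from arbitrary accumulators, appends the filtered projections.
theorem pcv_fold_general (l : List (String × String × String)) (a : List (String × String)) (b c : List String) :
    l.foldl
      (fun (acc : (List (String × String)) × List String × List String) t =>
        let (phenotype, concept, bl) := t
        if bl == "TRUE" then
          (acc.1 ++ [(phenotype, concept)], acc.2.1 ++ [phenotype], acc.2.2 ++ [concept])
        else acc)
      (a, b, c)
    = (a ++ (l.filter pcvPred).map (fun t => (t.1, t.2.1)),
       b ++ (l.filter pcvPred).map (fun t => t.1),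
       c ++ (l.filter pcvPred).map (fun t => t.2.1)) := by
  induction l generalizing a b c with
  | nil => simp
  | cons hd tl ih =>
    obtain ⟨p, q, r⟩ := hd
    by_cases h : r == "TRUE" <;> simp [List.foldl_cons, pcvPred, h] <;> simp_all [pcvPred]

-- setting the slot just past a fully-written prefix
theorem pcv_set_at_len {X : Type} (done : List X) (x y : X) (rest : List X) :
    (done ++ x :: rest).set done.length y = done ++ y :: rest := by
  induction done with
  | nil => rfl
  | cons h t ih => simp [List.set, ih]

-- the counting fold is countP
theorem pcv_count (l : List (String × String × String)) (n : Nat) :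
    l.foldl (fun n t => if t.2.2 == "TRUE" then n + 1 else n) n = n + l.countP pcvPred := by
  induction l generalizing n with
  | nil => simp
  | cons hd tl ih =>
    rw [List.foldl_cons, ih, List.countP_cons]
    unfold pcvPred
    by_cases h : hd.2.2 == "TRUE" <;> simp [h] <;> omega

-- the filling fold: from prefixes already written and exactly enough empty slots,
-- it writes the filtered projections and advances the cursor past them.
theorem pcv_fill_inv (l : List (String × String × String))
    (d1 : List (String × String)) (d2 d3 : List String)
    (h2 : d2.length = d1.length) (h3 : d3.length = d1.length) :
    l.foldl pcvFillStep
      (d1.map some ++ List.replicate (l.countP pcvPred) none,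
       d2.map some ++ List.replicate (l.countP pcvPred) none,
       d3.map some ++ List.replicate (l.countP pcvPred) none,
       d1.length)
    = ((d1 ++ (l.filter pcvPred).map (fun t => (t.1, t.2.1))).map some,
       (d2 ++ (l.filter pcvPred).map (fun t => t.1)).map some,
       (d3 ++ (l.filter pcvPred).map (fun t => t.2.1)).map some,
       d1.length + l.countP pcvPred) := by
  induction l generalizing d1 d2 d3 with
  | nil => simp
  | cons hd tl ih =>
    obtain ⟨p, q, r⟩ := hd
    by_cases h : r == "TRUE"
    · have hc : (((p, q, r) :: tl).countP pcvPred) = tl.countP pcvPred + 1 := by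
        simp [List.countP_cons, pcvPred, h]
      rw [hc]
      simp only [List.foldl_cons, pcvFillStep, h, if_pos rfl, List.replicate_succ]
      have e1 := pcv_set_at_len (d1.map some) (none : Option (String × String))
        (some (p, q)) (List.replicate (tl.countP pcvPred) none)
      have e2 := pcv_set_at_len (d2.map some) (none : Option String)
        (some p) (List.replicate (tl.countP pcvPred) none)
      have e3 := pcv_set_at_len (d3.map some) (none : Option String)
        (some q) (List.replicate (tl.countP pcvPred) none)
      simp only [List.length_map] at e1 e2 e3
      have ih' := ih (d1 ++ [(p, q)]) (d2 ++ [p]) (d3 ++ [q]) (by simp [h2]) (by simp [h3])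
      simp only [List.length_append, List.length_map] at *
      simp only [h2, h3] at e2 e3 ⊢
      rw [e1, e2, e3]
      have r1 : (d1.map some) ++ some (p, q) :: List.replicate (tl.countP pcvPred) none
          = (d1 ++ [(p, q)]).map some ++ List.replicate (tl.countP pcvPred) none := by simp
      have r2 : (d2.map some) ++ some p :: List.replicate (tl.countP pcvPred) none
          = (d2 ++ [p]).map some ++ List.replicate (tl.countP pcvPred) none := by simp
      have r3 : (d3.map some) ++ some q :: List.replicate (tl.countP pcvPred) none
          = (d3 ++ [q]).map some ++ List.replicate (tl.countP pcvPred) none := by simp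
      rw [r1, r2, r3]
      simp only [if_true, List.length_append, List.length_cons, List.length_nil] at ih' ⊢
      rw [ih']
      simp [List.filter_cons, pcvPred, h]
      omega
    · have hc : (((p, q, r) :: tl).countP pcvPred) = tl.countP pcvPred := by
        simp [List.countP_cons, pcvPred, h]
      rw [hc]
      simp only [List.foldl_cons, pcvFillStep, h, Bool.false_eq_true, if_false]
      rw [ih d1 d2 d3 h2 h3]
      simp [List.filter_cons, pcvPred, h]

-- ===== VERDICT (by name: the statement is the Claim_ definition above) =====
theorem process_concept_validation_spec : Claim_equal_process_concept_validation := by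
  intro l _
  unfold Spec_process_concept_validation process_concept_validation process_concept_validation_alt
  rw [pcv_fold_general, pcv_count]
  have := pcv_fill_inv l [] [] [] rfl rfl
  simp only [List.map_nil, List.nil_append, List.length_nil, Nat.zero_add] at this
  simp [this]
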